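-- pv_equiv track=rewrite | github.com/Baleeg-Alhilali/Bioe201Group3 | easy_to_run/ex48easier_to_run.py | find_longest_common_subsequence
-- ===== SOURCE A (Python) =====
-- def find_longest_common_subsequence(str1, str2, str3):
--     # Initialize the dimensions of the dynamic programming table for memoization.
--     len_str1 = len(str1)  # Length of the first input string.
--     len_str2 = len(str2)  # Length of the second input string.
--     len_str3 = len(str3)  # Length of the third input string.
--
--     # Create a 3D table (dp) to store the scores and alignment information.
--     # dp[i][j][k] will represent the length of the longest common subsequence of
--     # the first i characters of str1, the first j characters of str2, and the
--     # first k characters of str3.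
--     dp = [[[0] * (len_str3 + 1) for _ in range(len_str2 + 1)] for _ in range(len_str1 + 1)]
--
--     # Create a table (alignment) to store information about the alignment.
--     # alignment[i][j][k] will be '1' if characters str1[i-1], str2[j-1], and str3[k-1]
--     # are part of the longest common subsequence, or '0' if they are not.
--     alignment = [[['0'] * (len_str3 + 1) for _ in range(len_str2 + 1)] for _ in range(len_str1 + 1)]
--
--     # Fill in the dynamic programming table (dp) and alignment information.
--     for i in range(1, len_str1 + 1):
--         for j in range(1, len_str2 + 1):
--             for k in range(1, len_str3 + 1):
--                 if str1[i - 1] == str2[j - 1] == str3[k - 1]: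
--                     # If the current characters in all three strings match, extend the LCS.
--                     dp[i][j][k] = dp[i - 1][j - 1][k - 1] + 1
--                     alignment[i][j][k] = '1'  # '1' represents alignment
--                 else:
--                     # If characters do not match, update dp based on the previous values.
--                     if dp[i - 1][j][k] >= dp[i][j - 1][k] and dp[i - 1][j][k] >= dp[i][j][k - 1]:
--                         dp[i][j][k] = dp[i - 1][j][k]
--                         alignment[i][j][k] = '0'  # '0' represents a gap in the alignment
--                     elif dp[i][j - 1][k] >= dp[i][j][k - 1]:
--                         dp[i][j][k] = dp[i][j - 1][k]
--                         alignment[i][j][k] = '0'  # '0' represents a gap in the alignment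
--                     else:
--                         dp[i][j][k] = dp[i][j][k - 1]
--                         alignment[i][j][k] = '0'  # '0' represents a gap in the alignment
--
--     # Initialize variables to store the alignment and maximum score.
--     i = len_str1
--     j = len_str2
--     k = len_str3
--     aligned1 = ''  # Store the aligned characters from str1.
--     aligned2 = ''  # Store the aligned characters from str2.
--     aligned3 = ''  # Store the aligned characters from str3.
--
--     # Backtrack to reconstruct the alignments.
--     while i > 0 or j > 0 or k > 0:
--         if i > 0 and j > 0 and k > 0 and alignment[i][j][k] == '1':
--             # If the characters are part of the LCS, add them to the aligned strings.
--             aligned1 = str1[i - 1] + aligned1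
--             aligned2 = str2[j - 1] + aligned2
--             aligned3 = str3[k - 1] + aligned3
--             i -= 1
--             j -= 1
--             k -= 1
--         else:
--             if i > 0 and j > 0 and k > 0:
--                 # If characters are not part of the LCS, backtrack to find the direction
--                 # with the maximum score and add gaps accordingly.
--                 max_val = max(dp[i - 1][j][k], dp[i][j - 1][k], dp[i][j][k - 1])
--                 if max_val == dp[i - 1][j][k]:
--                     aligned1 = str1[i - 1] + aligned1
--                     aligned2 = '-' + aligned2
--                     aligned3 = '-' + aligned3
--                     i -= 1
--                 elif max_val == dp[i][j - 1][k]: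
--                     aligned1 = '-' + aligned1
--                     aligned2 = str2[j - 1] + aligned2
--                     aligned3 = '-' + aligned3
--                     j -= 1
--                 else:
--                     aligned1 = '-' + aligned1
--                     aligned2 = '-' + aligned2
--                     aligned3 = str3[k - 1] + aligned3
--                     k -= 1
--             else:
--                 if i > 0:
--                     aligned1 = str1[i - 1] + aligned1
--                     aligned2 = '-' + aligned2
--                     aligned3 = '-' + aligned3
--                     i -= 1
--                 elif j > 0:
--                     aligned1 = '-' + aligned1
--                     aligned2 = str2[j - 1] + aligned2
--                     aligned3 = '-' + aligned3
--                     j -= 1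
--                 else:
--                     aligned1 = '-' + aligned1
--                     aligned2 = '-' + aligned2
--                     aligned3 = str3[k - 1] + aligned3
--                     k -= 1
--
--     # Return the maximum score and the aligned strings.
--     return dp[len_str1][len_str2][len_str3], aligned1, aligned2, aligned3
-- ===== SOURCE B (Python) =====
-- def find_longest_common_subsequence(str1, str2, str3):
--     n1, n2, n3 = len(str1), len(str2), len(str3)
--     # Sparse dp: dict keyed by (i, j, k); missing cells (any index 0) are 0.
--     dp = {}
--     for i in range(1, n1 + 1):
--         for j in range(1, n2 + 1):
--             for k in range(1, n3 + 1):
--                 if str1[i - 1] == str2[j - 1] == str3[k - 1]: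
--                     dp[(i, j, k)] = dp.get((i - 1, j - 1, k - 1), 0) + 1
--                 else:
--                     dp[(i, j, k)] = max(dp.get((i - 1, j, k), 0),
--                                         dp.get((i, j - 1, k), 0),
--                                         dp.get((i, j, k - 1), 0))
--
--     def bt(i, j, k):
--         # Recursively reconstruct the alignment; appends on the way back,
--         # so no prepending / reversal is needed.
--         if i == 0 and j == 0 and k == 0:
--             return '', '', ''
--         if i > 0 and j > 0 and k > 0:
--             if str1[i - 1] == str2[j - 1] == str3[k - 1]:
--                 a, b, c = bt(i - 1, j - 1, k - 1)
--                 return a + str1[i - 1], b + str2[j - 1], c + str3[k - 1]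
--             u = dp.get((i - 1, j, k), 0)
--             v = dp.get((i, j - 1, k), 0)
--             w = dp.get((i, j, k - 1), 0)
--             if u >= v and u >= w:
--                 a, b, c = bt(i - 1, j, k)
--                 return a + str1[i - 1], b + '-', c + '-'
--             if v >= w:
--                 a, b, c = bt(i, j - 1, k)
--                 return a + '-', b + str2[j - 1], c + '-'
--             a, b, c = bt(i, j, k - 1)
--             return a + '-', b + '-', c + str3[k - 1]
--         if i > 0:
--             a, b, c = bt(i - 1, j, k)
--             return a + str1[i - 1], b + '-', c + '-'
--         if j > 0:
--             a, b, c = bt(i, j - 1, k)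
--             return a + '-', b + str2[j - 1], c + '-'
--         a, b, c = bt(i, j, k - 1)
--         return a + '-', b + '-', c + str3[k - 1]
--
--     a1, a2, a3 = bt(n1, n2, n3)
--     return dp.get((n1, n2, n3), 0), a1, a2, a3
-- ===== Notes on version B (the rewrite author's own statement) =====
-- stated objective: alternative
-- what changed: B drops A's second 3D 'alignment' table, stores the dp scores sparsely in a dict keyed by (i,j,k) with get-default-0 boundaries instead of preallocated nested lists, and reconstructs the alignment by a recursive backtracker that re-tests the three-way character equality and appends on return instead of A's while-loop that prepends and reads the stored alignment flags.
import Mathlib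
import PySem

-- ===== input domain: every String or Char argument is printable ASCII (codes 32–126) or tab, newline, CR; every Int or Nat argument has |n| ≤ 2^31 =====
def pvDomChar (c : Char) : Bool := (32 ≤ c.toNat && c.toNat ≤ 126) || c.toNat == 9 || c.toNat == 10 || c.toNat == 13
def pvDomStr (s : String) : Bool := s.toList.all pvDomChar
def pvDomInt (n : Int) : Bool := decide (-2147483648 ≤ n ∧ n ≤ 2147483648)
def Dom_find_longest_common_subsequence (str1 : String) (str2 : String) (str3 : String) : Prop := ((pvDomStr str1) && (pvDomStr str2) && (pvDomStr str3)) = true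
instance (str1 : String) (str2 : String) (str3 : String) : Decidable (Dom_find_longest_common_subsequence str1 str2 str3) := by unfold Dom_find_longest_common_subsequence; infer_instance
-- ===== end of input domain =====

-- B drops A's separate 3D alignment table (re-testing the 3-way char equality during a
-- recursive, append-on-return backtrack) and stores dp sparsely in a dict instead of
-- preallocated nested lists; same dp values and alignment output, proved equal on Dom.


-- ===== PORT A =====
-- A's 3D tables dp / alignment are ported as functions ℕ→ℕ→ℕ→· updated pointwise
-- (each Python assignment dp[i][j][k] = v is one pvUpd3); reads are applications.
def pvUpd3 {α : Type} (f : ℕ → ℕ → ℕ → α) (i j k : ℕ) (v : α) : ℕ → ℕ → ℕ → α :=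
  fun a b c => if a = i ∧ b = j ∧ c = k then v else f a b c

-- the three-way character comparison str1[i-1] == str2[j-1] == str3[k-1]
-- (abbrev, so the standard Decidable instances apply through it)
abbrev pvMatch (s1 s2 s3 : List Char) (i j k : ℕ) : Prop :=
  s1.getD (i - 1) ' ' = s2.getD (j - 1) ' ' ∧ s2.getD (j - 1) ' ' = s3.getD (k - 1) ' '

-- body of A's innermost loop at cell (i,j,k)
def pvAbody (s1 s2 s3 : List Char) (i j k : ℕ)
    (st : (ℕ → ℕ → ℕ → Int) × (ℕ → ℕ → ℕ → Char)) :
    (ℕ → ℕ → ℕ → Int) × (ℕ → ℕ → ℕ → Char) :=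
  let dp := st.1
  let al := st.2
  if pvMatch s1 s2 s3 i j k then
    (pvUpd3 dp i j k (dp (i-1) (j-1) (k-1) + 1), pvUpd3 al i j k '1')
  else if dp (i-1) j k ≥ dp i (j-1) k ∧ dp (i-1) j k ≥ dp i j (k-1) then
    (pvUpd3 dp i j k (dp (i-1) j k), pvUpd3 al i j k '0')
  else if dp i (j-1) k ≥ dp i j (k-1) then
    (pvUpd3 dp i j k (dp i (j-1) k), pvUpd3 al i j k '0')
  else
    (pvUpd3 dp i j k (dp i j (k-1)), pvUpd3 al i j k '0')

-- for k in range(1, len3+1)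
def pvAloopK (s1 s2 s3 : List Char) (i j : ℕ) :
    ℕ → (ℕ → ℕ → ℕ → Int) × (ℕ → ℕ → ℕ → Char) → (ℕ → ℕ → ℕ → Int) × (ℕ → ℕ → ℕ → Char)
  | 0, st => st
  | k + 1, st => pvAbody s1 s2 s3 i j (k + 1) (pvAloopK s1 s2 s3 i j k st)

-- for j in range(1, len2+1)
def pvAloopJ (s1 s2 s3 : List Char) (n3 i : ℕ) :
    ℕ → (ℕ → ℕ → ℕ → Int) × (ℕ → ℕ → ℕ → Char) → (ℕ → ℕ → ℕ → Int) × (ℕ → ℕ → ℕ → Char)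
  | 0, st => st
  | j + 1, st => pvAloopK s1 s2 s3 i (j + 1) n3 (pvAloopJ s1 s2 s3 n3 i j st)

-- for i in range(1, len1+1)
def pvAloopI (s1 s2 s3 : List Char) (n2 n3 : ℕ) :
    ℕ → (ℕ → ℕ → ℕ → Int) × (ℕ → ℕ → ℕ → Char) → (ℕ → ℕ → ℕ → Int) × (ℕ → ℕ → ℕ → Char)
  | 0, st => st
  | i + 1, st => pvAloopJ s1 s2 s3 n3 (i + 1) n2 (pvAloopI s1 s2 s3 n2 n3 i st)

-- A's backtracking while-loop; the aligned strings are accumulated as List Char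
-- (prepending, as the Python prepends) and packed with String.ofList at the end.
-- `fuel` only makes the recursion structural; the loop runs at most i+j+k times,
-- so the entry point's fuel i+j+k is never exhausted.
def pvAback (s1 s2 s3 : List Char) (dp : ℕ → ℕ → ℕ → Int) (al : ℕ → ℕ → ℕ → Char) :
    ℕ → ℕ → ℕ → ℕ → List Char → List Char → List Char → List Char × List Char × List Char
  | 0, _, _, _, a1, a2, a3 => (a1, a2, a3)
  | fuel + 1, i, j, k, a1, a2, a3 =>
    if i > 0 ∨ j > 0 ∨ k > 0 then
      if i > 0 ∧ j > 0 ∧ k > 0 ∧ al i j k = '1' then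
        pvAback s1 s2 s3 dp al fuel (i-1) (j-1) (k-1)
          (s1.getD (i-1) ' ' :: a1) (s2.getD (j-1) ' ' :: a2) (s3.getD (k-1) ' ' :: a3)
      else if i > 0 ∧ j > 0 ∧ k > 0 then
        -- max_val = max(dp[i-1][j][k], dp[i][j-1][k], dp[i][j][k-1])
        let m := max (max (dp (i-1) j k) (dp i (j-1) k)) (dp i j (k-1))
        if m = dp (i-1) j k then
          pvAback s1 s2 s3 dp al fuel (i-1) j k (s1.getD (i-1) ' ' :: a1) ('-' :: a2) ('-' :: a3)
        else if m = dp i (j-1) k then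
          pvAback s1 s2 s3 dp al fuel i (j-1) k ('-' :: a1) (s2.getD (j-1) ' ' :: a2) ('-' :: a3)
        else
          pvAback s1 s2 s3 dp al fuel i j (k-1) ('-' :: a1) ('-' :: a2) (s3.getD (k-1) ' ' :: a3)
      else if i > 0 then
        pvAback s1 s2 s3 dp al fuel (i-1) j k (s1.getD (i-1) ' ' :: a1) ('-' :: a2) ('-' :: a3)
      else if j > 0 then
        pvAback s1 s2 s3 dp al fuel i (j-1) k ('-' :: a1) (s2.getD (j-1) ' ' :: a2) ('-' :: a3)
      else
        pvAback s1 s2 s3 dp al fuel i j (k-1) ('-' :: a1) ('-' :: a2) (s3.getD (k-1) ' ' :: a3)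
    else (a1, a2, a3)

def find_longest_common_subsequence (str1 : String) (str2 : String) (str3 : String) :
    Int × String × String × String :=
  let s1 := str1.toList
  let s2 := str2.toList
  let s3 := str3.toList
  let st := pvAloopI s1 s2 s3 s2.length s3.length s1.length
    (fun _ _ _ => 0, fun _ _ _ => '0')
  let r := pvAback s1 s2 s3 st.1 st.2 (s1.length + s2.length + s3.length)
    s1.length s2.length s3.length [] [] []
  (st.1 s1.length s2.length s3.length, String.ofList r.1, String.ofList r.2.1, String.ofList r.2.2)

-- ===== PORT B =====
-- B's sparse dp dict, keyed by the index triple, default 0 on absent (boundary) cells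
def pvBbody (s1 s2 s3 : List Char) (i j k : ℕ) (d : PySem.Dict (ℕ × ℕ × ℕ) Int) :
    PySem.Dict (ℕ × ℕ × ℕ) Int :=
  if pvMatch s1 s2 s3 i j k then
    d.insert (i, j, k) (d.getD (i-1, j-1, k-1) 0 + 1)
  else
    d.insert (i, j, k)
      (max (max (d.getD (i-1, j, k) 0) (d.getD (i, j-1, k) 0)) (d.getD (i, j, k-1) 0))

def pvBloopK (s1 s2 s3 : List Char) (i j : ℕ) :
    ℕ → PySem.Dict (ℕ × ℕ × ℕ) Int → PySem.Dict (ℕ × ℕ × ℕ) Int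
  | 0, d => d
  | k + 1, d => pvBbody s1 s2 s3 i j (k + 1) (pvBloopK s1 s2 s3 i j k d)

def pvBloopJ (s1 s2 s3 : List Char) (n3 i : ℕ) :
    ℕ → PySem.Dict (ℕ × ℕ × ℕ) Int → PySem.Dict (ℕ × ℕ × ℕ) Int
  | 0, d => d
  | j + 1, d => pvBloopK s1 s2 s3 i (j + 1) n3 (pvBloopJ s1 s2 s3 n3 i j d)

def pvBloopI (s1 s2 s3 : List Char) (n2 n3 : ℕ) :
    ℕ → PySem.Dict (ℕ × ℕ × ℕ) Int → PySem.Dict (ℕ × ℕ × ℕ) Int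
  | 0, d => d
  | i + 1, d => pvBloopJ s1 s2 s3 n3 (i + 1) n2 (pvBloopI s1 s2 s3 n2 n3 i d)

-- B's recursive backtracker bt(i, j, k): builds the triple by appending on return
-- (`fuel` makes the recursion structural; it starts at i+j+k and never runs out)
def pvBbt (s1 s2 s3 : List Char) (d : PySem.Dict (ℕ × ℕ × ℕ) Int) :
    ℕ → ℕ → ℕ → ℕ → List Char × List Char × List Char
  | 0, _, _, _ => ([], [], [])
  | fuel + 1, i, j, k =>
    if i = 0 ∧ j = 0 ∧ k = 0 then ([], [], [])
    else if i > 0 ∧ j > 0 ∧ k > 0 then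
      if pvMatch s1 s2 s3 i j k then
        let t := pvBbt s1 s2 s3 d fuel (i-1) (j-1) (k-1)
        (t.1 ++ [s1.getD (i-1) ' '], t.2.1 ++ [s2.getD (j-1) ' '], t.2.2 ++ [s3.getD (k-1) ' '])
      else
        let u := d.getD (i-1, j, k) 0
        let v := d.getD (i, j-1, k) 0
        let w := d.getD (i, j, k-1) 0
        if u ≥ v ∧ u ≥ w then
          let t := pvBbt s1 s2 s3 d fuel (i-1) j k
          (t.1 ++ [s1.getD (i-1) ' '], t.2.1 ++ ['-'], t.2.2 ++ ['-'])
        else if v ≥ w then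
          let t := pvBbt s1 s2 s3 d fuel i (j-1) k
          (t.1 ++ ['-'], t.2.1 ++ [s2.getD (j-1) ' '], t.2.2 ++ ['-'])
        else
          let t := pvBbt s1 s2 s3 d fuel i j (k-1)
          (t.1 ++ ['-'], t.2.1 ++ ['-'], t.2.2 ++ [s3.getD (k-1) ' '])
    else if i > 0 then
      let t := pvBbt s1 s2 s3 d fuel (i-1) j k
      (t.1 ++ [s1.getD (i-1) ' '], t.2.1 ++ ['-'], t.2.2 ++ ['-'])
    else if j > 0 then
      let t := pvBbt s1 s2 s3 d fuel i (j-1) k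
      (t.1 ++ ['-'], t.2.1 ++ [s2.getD (j-1) ' '], t.2.2 ++ ['-'])
    else
      let t := pvBbt s1 s2 s3 d fuel i j (k-1)
      (t.1 ++ ['-'], t.2.1 ++ ['-'], t.2.2 ++ [s3.getD (k-1) ' '])

def find_longest_common_subsequence_alt (str1 : String) (str2 : String) (str3 : String) :
    Int × String × String × String :=
  let s1 := str1.toList
  let s2 := str2.toList
  let s3 := str3.toList
  let d := pvBloopI s1 s2 s3 s2.length s3.length s1.length PySem.Dict.empty
  let t := pvBbt s1 s2 s3 d (s1.length + s2.length + s3.length)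
    s1.length s2.length s3.length
  (d.getD (s1.length, s2.length, s3.length) 0, String.ofList t.1, String.ofList t.2.1, String.ofList t.2.2)

-- ===== PRECONDITION & SPEC =====
def Spec_find_longest_common_subsequence (str1 : String) (str2 : String) (str3 : String) (out : Int × String × String × String) : Prop := out = find_longest_common_subsequence_alt str1 str2 str3
instance (str1 : String) (str2 : String) (str3 : String) (out : Int × String × String × String) : Decidable (Spec_find_longest_common_subsequence str1 str2 str3 out) := by unfold Spec_find_longest_common_subsequence; infer_instance

-- ===== CLAIM (what is proved, stated in full; the proofs are below) =====
def Claim_equal_find_longest_common_subsequence : Prop := ∀ (str1 : String) (str2 : String) (str3 : String), Dom_find_longest_common_subsequence str1 str2 str3 → Spec_find_longest_common_subsequence str1 str2 str3 (find_longest_common_subsequence str1 str2 str3)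

-- ===== LEMMAS AND PROOFS =====

-- the mathematical dp recurrence both fills compute
def pvDpF (s1 s2 s3 : List Char) : ℕ → ℕ → ℕ → Int
  | i + 1, j + 1, k + 1 =>
    if pvMatch s1 s2 s3 (i+1) (j+1) (k+1) then pvDpF s1 s2 s3 i j k + 1
    else max (max (pvDpF s1 s2 s3 i (j+1) (k+1)) (pvDpF s1 s2 s3 (i+1) j (k+1)))
             (pvDpF s1 s2 s3 (i+1) (j+1) k)
  | _, _, _ => 0
termination_by i j k => i + j + k
decreasing_by all_goals omega

-- cells already written when the fill loops stand at (i0, j0, k0)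
abbrev pvDone (l1 l2 l3 i0 j0 k0 i j k : ℕ) : Prop :=
  1 ≤ i ∧ i ≤ l1 ∧ 1 ≤ j ∧ j ≤ l2 ∧ 1 ≤ k ∧ k ≤ l3 ∧
    (i < i0 ∨ (i = i0 ∧ (j < j0 ∨ (j = j0 ∧ k ≤ k0))))

-- invariants of the two fills
def pvInvA (s1 s2 s3 : List Char) (st : (ℕ → ℕ → ℕ → Int) × (ℕ → ℕ → ℕ → Char))
    (i0 j0 k0 : ℕ) : Prop :=
  ∀ i j k, (st.1 i j k =
      if pvDone s1.length s2.length s3.length i0 j0 k0 i j k then pvDpF s1 s2 s3 i j k else 0)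
    ∧ (st.2 i j k =
      if pvDone s1.length s2.length s3.length i0 j0 k0 i j k ∧ pvMatch s1 s2 s3 i j k
      then '1' else '0')

def pvInvB (s1 s2 s3 : List Char) (d : PySem.Dict (ℕ × ℕ × ℕ) Int) (i0 j0 k0 : ℕ) : Prop :=
  ∀ i j k, d.getD (i, j, k) 0 =
    if pvDone s1.length s2.length s3.length i0 j0 k0 i j k then pvDpF s1 s2 s3 i j k else 0

theorem pvDpF_step (s1 s2 s3 : List Char) (i j k : ℕ) (hi : 1 ≤ i) (hj : 1 ≤ j) (hk : 1 ≤ k) :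
    pvDpF s1 s2 s3 i j k =
      if pvMatch s1 s2 s3 i j k then pvDpF s1 s2 s3 (i-1) (j-1) (k-1) + 1
      else max (max (pvDpF s1 s2 s3 (i-1) j k) (pvDpF s1 s2 s3 i (j-1) k))
               (pvDpF s1 s2 s3 i j (k-1)) := by
  obtain ⟨i', rfl⟩ : ∃ i', i = i' + 1 := ⟨i - 1, by omega⟩
  obtain ⟨j', rfl⟩ : ∃ j', j = j' + 1 := ⟨j - 1, by omega⟩
  obtain ⟨k', rfl⟩ : ∃ k', k = k' + 1 := ⟨k - 1, by omega⟩
  simp [pvDpF]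

theorem pvDpF_zero (s1 s2 s3 : List Char) (i j k : ℕ) (h : i = 0 ∨ j = 0 ∨ k = 0) :
    pvDpF s1 s2 s3 i j k = 0 := by
  rcases h with h | h | h <;> subst h <;>
    (first
      | rfl
      | (cases i <;> cases j <;> simp [pvDpF]
         )
      | (cases i <;> cases k <;> simp [pvDpF])
      | (cases j <;> cases k <;> simp [pvDpF]))

theorem pvAstep (s1 s2 s3 : List Char) (st : (ℕ → ℕ → ℕ → Int) × (ℕ → ℕ → ℕ → Char))
    (i0 j0 k0 : ℕ) (hIA : pvInvA s1 s2 s3 st i0 j0 k0)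
    (hi : 1 ≤ i0) (hi' : i0 ≤ s1.length) (hj : 1 ≤ j0) (hj' : j0 ≤ s2.length)
    (hk : k0 < s3.length) :
    pvInvA s1 s2 s3 (pvAbody s1 s2 s3 i0 j0 (k0+1) st) i0 j0 (k0+1) := by
  have r1 : st.1 (i0-1) (j0-1) k0 = pvDpF s1 s2 s3 (i0-1) (j0-1) k0 := by
    rw [(hIA _ _ _).1]; unfold pvDone; split_ifs with h
    · rfl
    · exact (pvDpF_zero _ _ _ _ _ _ (by omega)).symm
  have r2 : st.1 (i0-1) j0 (k0+1) = pvDpF s1 s2 s3 (i0-1) j0 (k0+1) := by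
    rw [(hIA _ _ _).1]; unfold pvDone; split_ifs with h
    · rfl
    · exact (pvDpF_zero _ _ _ _ _ _ (by omega)).symm
  have r3 : st.1 i0 (j0-1) (k0+1) = pvDpF s1 s2 s3 i0 (j0-1) (k0+1) := by
    rw [(hIA _ _ _).1]; unfold pvDone; split_ifs with h
    · rfl
    · exact (pvDpF_zero _ _ _ _ _ _ (by omega)).symm
  have r4 : st.1 i0 j0 k0 = pvDpF s1 s2 s3 i0 j0 k0 := by
    rw [(hIA _ _ _).1]; unfold pvDone; split_ifs with h
    · rfl
    · exact (pvDpF_zero _ _ _ _ _ _ (by omega)).symm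
  have hstep := pvDpF_step s1 s2 s3 i0 j0 (k0+1) hi hj (by omega)
  intro i j k
  by_cases hcell : i = i0 ∧ j = j0 ∧ k = k0 + 1
  · obtain ⟨rfl, rfl, rfl⟩ := hcell
    have hdone : pvDone s1.length s2.length s3.length i j (k0+1) i j (k0+1) := by
      unfold pvDone; omega
    constructor
    · rw [if_pos hdone]
      simp only [pvAbody]
      by_cases hm : pvMatch s1 s2 s3 i j (k0+1)
      · simp only [if_pos hm, pvUpd3, and_self, if_true]
        rw [hstep, if_pos hm]
        simp only [Nat.add_sub_cancel]
        rw [r1]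
      · rw [hstep, if_neg hm]
        simp only [if_neg hm]
        split_ifs with c1 c2 <;>
          simp_all only [pvUpd3, and_self, if_true, Nat.add_sub_cancel] <;>
          omega
    · simp only [pvAbody]
      by_cases hm : pvMatch s1 s2 s3 i j (k0+1)
      · simp only [if_pos hm, pvUpd3, and_self, if_true]
        rw [if_pos ⟨hdone, hm⟩]
      · rw [if_neg (show ¬(pvDone s1.length s2.length s3.length i j (k0+1) i j (k0+1) ∧
            pvMatch s1 s2 s3 i j (k0+1)) from fun h => hm h.2)]
        simp only [if_neg hm]
        split_ifs <;> simp [pvUpd3]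
  · have hsame : pvDone s1.length s2.length s3.length i0 j0 (k0+1) i j k ↔
        pvDone s1.length s2.length s3.length i0 j0 k0 i j k := by
      unfold pvDone; omega
    have hd1 : (pvAbody s1 s2 s3 i0 j0 (k0+1) st).1 i j k = st.1 i j k := by
      simp only [pvAbody]
      split_ifs <;> simp [pvUpd3, hcell]
    have hd2 : (pvAbody s1 s2 s3 i0 j0 (k0+1) st).2 i j k = st.2 i j k := by
      simp only [pvAbody]
      split_ifs <;> simp [pvUpd3, hcell]
    constructor
    · rw [hd1, (hIA i j k).1]
      by_cases h : pvDone s1.length s2.length s3.length i0 j0 k0 i j k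
      · rw [if_pos h, if_pos (hsame.mpr h)]
      · rw [if_neg h, if_neg (fun h' => h (hsame.mp h'))]
    · rw [hd2, (hIA i j k).2]
      by_cases h : pvDone s1.length s2.length s3.length i0 j0 k0 i j k ∧ pvMatch s1 s2 s3 i j k
      · rw [if_pos h, if_pos ⟨hsame.mpr h.1, h.2⟩]
      · rw [if_neg h, if_neg (fun h' => h ⟨hsame.mp h'.1, h'.2⟩)]

theorem pvBstep (s1 s2 s3 : List Char) (d : PySem.Dict (ℕ × ℕ × ℕ) Int)
    (i0 j0 k0 : ℕ) (hIB : pvInvB s1 s2 s3 d i0 j0 k0)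
    (hi : 1 ≤ i0) (hi' : i0 ≤ s1.length) (hj : 1 ≤ j0) (hj' : j0 ≤ s2.length)
    (hk : k0 < s3.length) :
    pvInvB s1 s2 s3 (pvBbody s1 s2 s3 i0 j0 (k0+1) d) i0 j0 (k0+1) := by
  have r1 : d.getD (i0-1, j0-1, k0) 0 = pvDpF s1 s2 s3 (i0-1) (j0-1) k0 := by
    rw [hIB]; unfold pvDone; split_ifs with h
    · rfl
    · exact (pvDpF_zero _ _ _ _ _ _ (by omega)).symm
  have r2 : d.getD (i0-1, j0, k0+1) 0 = pvDpF s1 s2 s3 (i0-1) j0 (k0+1) := by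
    rw [hIB]; unfold pvDone; split_ifs with h
    · rfl
    · exact (pvDpF_zero _ _ _ _ _ _ (by omega)).symm
  have r3 : d.getD (i0, j0-1, k0+1) 0 = pvDpF s1 s2 s3 i0 (j0-1) (k0+1) := by
    rw [hIB]; unfold pvDone; split_ifs with h
    · rfl
    · exact (pvDpF_zero _ _ _ _ _ _ (by omega)).symm
  have r4 : d.getD (i0, j0, k0) 0 = pvDpF s1 s2 s3 i0 j0 k0 := by
    rw [hIB]; unfold pvDone; split_ifs with h
    · rfl
    · exact (pvDpF_zero _ _ _ _ _ _ (by omega)).symm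
  have hstep := pvDpF_step s1 s2 s3 i0 j0 (k0+1) hi hj (by omega)
  intro i j k
  by_cases hcell : i = i0 ∧ j = j0 ∧ k = k0 + 1
  · obtain ⟨rfl, rfl, rfl⟩ := hcell
    have hdone : pvDone s1.length s2.length s3.length i j (k0+1) i j (k0+1) := by
      unfold pvDone; omega
    rw [if_pos hdone]
    simp only [pvBbody]
    by_cases hm : pvMatch s1 s2 s3 i j (k0+1)
    · rw [if_pos hm, PySem.Dict.getD_insert_self, hstep, if_pos hm]
      simp only [Nat.add_sub_cancel]
      rw [r1]
    · rw [if_neg hm, PySem.Dict.getD_insert_self, hstep, if_neg hm]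
      simp only [Nat.add_sub_cancel, r2, r3, r4]
  · have hne : ((i, j, k) : ℕ × ℕ × ℕ) ≠ (i0, j0, k0+1) := by
      simpa [Prod.mk.injEq] using hcell
    have hd : (pvBbody s1 s2 s3 i0 j0 (k0+1) d).getD (i, j, k) 0 = d.getD (i, j, k) 0 := by
      simp only [pvBbody]
      split_ifs <;> (rw [PySem.Dict.getD_insert_of_ne]; exact hne)
    have hsame : pvDone s1.length s2.length s3.length i0 j0 (k0+1) i j k ↔
        pvDone s1.length s2.length s3.length i0 j0 k0 i j k := by
      unfold pvDone; omega
    rw [hd, hIB i j k]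
    by_cases h : pvDone s1.length s2.length s3.length i0 j0 k0 i j k
    · rw [if_pos h, if_pos (hsame.mpr h)]
    · rw [if_neg h, if_neg (fun h' => h (hsame.mp h'))]

theorem pvInvA_mono (s1 s2 s3 : List Char) (st : (ℕ → ℕ → ℕ → Int) × (ℕ → ℕ → ℕ → Char))
    (a b c a' b' c' : ℕ)
    (h : ∀ i j k, pvDone s1.length s2.length s3.length a b c i j k ↔
      pvDone s1.length s2.length s3.length a' b' c' i j k)
    (hI : pvInvA s1 s2 s3 st a b c) : pvInvA s1 s2 s3 st a' b' c' := by
  intro i j k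
  exact ⟨by rw [(hI i j k).1, if_congr (h i j k) rfl rfl],
    by rw [(hI i j k).2, if_congr (and_congr_left' (h i j k)) rfl rfl]⟩

theorem pvInvB_mono (s1 s2 s3 : List Char) (d : PySem.Dict (ℕ × ℕ × ℕ) Int)
    (a b c a' b' c' : ℕ)
    (h : ∀ i j k, pvDone s1.length s2.length s3.length a b c i j k ↔
      pvDone s1.length s2.length s3.length a' b' c' i j k)
    (hI : pvInvB s1 s2 s3 d a b c) : pvInvB s1 s2 s3 d a' b' c' := by
  intro i j k
  rw [hI i j k, if_congr (h i j k) rfl rfl]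

theorem pvAloopK_inv (s1 s2 s3 : List Char) (i0 j0 : ℕ)
    (hi : 1 ≤ i0) (hi' : i0 ≤ s1.length) (hj : 1 ≤ j0) (hj' : j0 ≤ s2.length) :
    ∀ (kc : ℕ) (st : (ℕ → ℕ → ℕ → Int) × (ℕ → ℕ → ℕ → Char)), kc ≤ s3.length →
      pvInvA s1 s2 s3 st i0 j0 0 →
      pvInvA s1 s2 s3 (pvAloopK s1 s2 s3 i0 j0 kc st) i0 j0 kc
  | 0, st, _, hI => hI
  | kc + 1, st, hk, hI =>
    pvAstep s1 s2 s3 _ i0 j0 kc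
      (pvAloopK_inv s1 s2 s3 i0 j0 hi hi' hj hj' kc st (by omega) hI)
      hi hi' hj hj' (by omega)

theorem pvBloopK_inv (s1 s2 s3 : List Char) (i0 j0 : ℕ)
    (hi : 1 ≤ i0) (hi' : i0 ≤ s1.length) (hj : 1 ≤ j0) (hj' : j0 ≤ s2.length) :
    ∀ (kc : ℕ) (d : PySem.Dict (ℕ × ℕ × ℕ) Int), kc ≤ s3.length →
      pvInvB s1 s2 s3 d i0 j0 0 →
      pvInvB s1 s2 s3 (pvBloopK s1 s2 s3 i0 j0 kc d) i0 j0 kc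
  | 0, d, _, hI => hI
  | kc + 1, d, hk, hI =>
    pvBstep s1 s2 s3 _ i0 j0 kc
      (pvBloopK_inv s1 s2 s3 i0 j0 hi hi' hj hj' kc d (by omega) hI)
      hi hi' hj hj' (by omega)

theorem pvAloopJ_inv (s1 s2 s3 : List Char) (i0 : ℕ)
    (hi : 1 ≤ i0) (hi' : i0 ≤ s1.length) :
    ∀ (jc : ℕ) (st : (ℕ → ℕ → ℕ → Int) × (ℕ → ℕ → ℕ → Char)), jc ≤ s2.length →
      pvInvA s1 s2 s3 st i0 0 0 →
      pvInvA s1 s2 s3 (pvAloopJ s1 s2 s3 s3.length i0 jc st) i0 jc s3.length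
  | 0, st, _, hI =>
    pvInvA_mono s1 s2 s3 st i0 0 0 i0 0 s3.length
      (by intro i j k; unfold pvDone; omega) hI
  | jc + 1, st, hj, hI =>
    pvAloopK_inv s1 s2 s3 i0 (jc + 1) hi hi' (by omega) (by omega) s3.length _ le_rfl
      (pvInvA_mono s1 s2 s3 _ i0 jc s3.length i0 (jc + 1) 0
        (by intro i j k; unfold pvDone; omega)
        (pvAloopJ_inv s1 s2 s3 i0 hi hi' jc st (by omega) hI))

theorem pvBloopJ_inv (s1 s2 s3 : List Char) (i0 : ℕ)
    (hi : 1 ≤ i0) (hi' : i0 ≤ s1.length) :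
    ∀ (jc : ℕ) (d : PySem.Dict (ℕ × ℕ × ℕ) Int), jc ≤ s2.length →
      pvInvB s1 s2 s3 d i0 0 0 →
      pvInvB s1 s2 s3 (pvBloopJ s1 s2 s3 s3.length i0 jc d) i0 jc s3.length
  | 0, d, _, hI =>
    pvInvB_mono s1 s2 s3 d i0 0 0 i0 0 s3.length
      (by intro i j k; unfold pvDone; omega) hI
  | jc + 1, d, hj, hI =>
    pvBloopK_inv s1 s2 s3 i0 (jc + 1) hi hi' (by omega) (by omega) s3.length _ le_rfl
      (pvInvB_mono s1 s2 s3 _ i0 jc s3.length i0 (jc + 1) 0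
        (by intro i j k; unfold pvDone; omega)
        (pvBloopJ_inv s1 s2 s3 i0 hi hi' jc d (by omega) hI))

theorem pvAloopI_inv (s1 s2 s3 : List Char) :
    ∀ (ic : ℕ) (st : (ℕ → ℕ → ℕ → Int) × (ℕ → ℕ → ℕ → Char)), ic ≤ s1.length →
      pvInvA s1 s2 s3 st 0 0 0 →
      pvInvA s1 s2 s3 (pvAloopI s1 s2 s3 s2.length s3.length ic st) ic s2.length s3.length
  | 0, st, _, hI =>
    pvInvA_mono s1 s2 s3 st 0 0 0 0 s2.length s3.length
      (by intro i j k; unfold pvDone; omega) hI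
  | ic + 1, st, hic, hI =>
    pvAloopJ_inv s1 s2 s3 (ic + 1) (by omega) (by omega) s2.length _ le_rfl
      (pvInvA_mono s1 s2 s3 _ ic s2.length s3.length (ic + 1) 0 0
        (by intro i j k; unfold pvDone; omega)
        (pvAloopI_inv s1 s2 s3 ic st (by omega) hI))

theorem pvBloopI_inv (s1 s2 s3 : List Char) :
    ∀ (ic : ℕ) (d : PySem.Dict (ℕ × ℕ × ℕ) Int), ic ≤ s1.length →
      pvInvB s1 s2 s3 d 0 0 0 →
      pvInvB s1 s2 s3 (pvBloopI s1 s2 s3 s2.length s3.length ic d) ic s2.length s3.length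
  | 0, d, _, hI =>
    pvInvB_mono s1 s2 s3 d 0 0 0 0 s2.length s3.length
      (by intro i j k; unfold pvDone; omega) hI
  | ic + 1, d, hic, hI =>
    pvBloopJ_inv s1 s2 s3 (ic + 1) (by omega) (by omega) s2.length _ le_rfl
      (pvInvB_mono s1 s2 s3 _ ic s2.length s3.length (ic + 1) 0 0
        (by intro i j k; unfold pvDone; omega)
        (pvBloopI_inv s1 s2 s3 ic d (by omega) hI))

theorem pvAfill (s1 s2 s3 : List Char) :
    pvInvA s1 s2 s3
      (pvAloopI s1 s2 s3 s2.length s3.length s1.length (fun _ _ _ => 0, fun _ _ _ => '0'))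
      s1.length s2.length s3.length := by
  refine pvAloopI_inv s1 s2 s3 s1.length _ le_rfl ?_
  intro i j k
  constructor
  · rw [if_neg (by unfold pvDone; omega)]
  · rw [if_neg (by unfold pvDone; omega : ¬(pvDone s1.length s2.length s3.length 0 0 0 i j k ∧
      pvMatch s1 s2 s3 i j k))]

theorem pvBfill (s1 s2 s3 : List Char) :
    pvInvB s1 s2 s3
      (pvBloopI s1 s2 s3 s2.length s3.length s1.length PySem.Dict.empty)
      s1.length s2.length s3.length := by
  refine pvBloopI_inv s1 s2 s3 s1.length _ le_rfl ?_
  intro i j k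
  rw [if_neg (by unfold pvDone; omega)]
  rfl

-- final-table characterisation
def pvVal (s1 s2 s3 : List Char) (i j k : ℕ) : Int :=
  if 1 ≤ i ∧ i ≤ s1.length ∧ 1 ≤ j ∧ j ≤ s2.length ∧ 1 ≤ k ∧ k ≤ s3.length
  then pvDpF s1 s2 s3 i j k else 0

theorem pvBack_eq (s1 s2 s3 : List Char) (dp : ℕ → ℕ → ℕ → Int) (al : ℕ → ℕ → ℕ → Char)
    (d : PySem.Dict (ℕ × ℕ × ℕ) Int)
    (hdp : ∀ i j k, dp i j k = pvVal s1 s2 s3 i j k)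
    (hal : ∀ i j k, al i j k =
      if (1 ≤ i ∧ i ≤ s1.length ∧ 1 ≤ j ∧ j ≤ s2.length ∧ 1 ≤ k ∧ k ≤ s3.length) ∧
          pvMatch s1 s2 s3 i j k then '1' else '0')
    (hB : ∀ i j k, d.getD (i, j, k) 0 = pvVal s1 s2 s3 i j k) :
    ∀ n i j k a1 a2 a3, i + j + k ≤ n → i ≤ s1.length → j ≤ s2.length → k ≤ s3.length →
      pvAback s1 s2 s3 dp al n i j k a1 a2 a3 =
        ((pvBbt s1 s2 s3 d n i j k).1 ++ a1, (pvBbt s1 s2 s3 d n i j k).2.1 ++ a2,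
         (pvBbt s1 s2 s3 d n i j k).2.2 ++ a3) := by
  intro n
  induction n with
  | zero =>
    intro i j k a1 a2 a3 hn hi hj hk
    have h0 : i = 0 ∧ j = 0 ∧ k = 0 := by omega
    obtain ⟨rfl, rfl, rfl⟩ := h0
    rw [pvAback, pvBbt]
    simp
  | succ n ih =>
    intro i j k a1 a2 a3 hn hi hj hk
    by_cases h0 : i = 0 ∧ j = 0 ∧ k = 0
    · obtain ⟨rfl, rfl, rfl⟩ := h0
      rw [pvAback, pvBbt]
      simp
    · rw [pvAback, pvBbt]
      rw [if_pos (show i > 0 ∨ j > 0 ∨ k > 0 by omega), if_neg h0]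
      by_cases hall : i > 0 ∧ j > 0 ∧ k > 0
      · by_cases hm : pvMatch s1 s2 s3 i j k
        · have hal1 : al i j k = '1' := by
            rw [hal, if_pos ⟨⟨by omega, hi, by omega, hj, by omega, hk⟩, hm⟩]
          rw [if_pos ⟨hall.1, hall.2.1, hall.2.2, hal1⟩, if_pos hall, if_pos hm,
            ih (i-1) (j-1) (k-1) _ _ _ (by omega) (by omega) (by omega) (by omega)]
          simp
        · have hal0 : al i j k = '0' := by
            rw [hal, if_neg (fun h => hm h.2)]
          rw [if_neg (fun h => by rw [hal0] at h; exact absurd h.2.2.2 (by decide)),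
            if_pos hall, if_pos hall, if_neg hm]
          simp only [hdp, hB]
          by_cases c1 : pvVal s1 s2 s3 (i-1) j k ≥ pvVal s1 s2 s3 i (j-1) k ∧
              pvVal s1 s2 s3 (i-1) j k ≥ pvVal s1 s2 s3 i j (k-1)
          · rw [if_pos (show max (max (pvVal s1 s2 s3 (i-1) j k) (pvVal s1 s2 s3 i (j-1) k))
                (pvVal s1 s2 s3 i j (k-1)) = pvVal s1 s2 s3 (i-1) j k by omega), if_pos c1,
              ih (i-1) j k _ _ _ (by omega) (by omega) hj hk]
            simp
          · rw [if_neg (show ¬(max (max (pvVal s1 s2 s3 (i-1) j k) (pvVal s1 s2 s3 i (j-1) k))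
                (pvVal s1 s2 s3 i j (k-1)) = pvVal s1 s2 s3 (i-1) j k) by omega), if_neg c1]
            by_cases c2 : pvVal s1 s2 s3 i (j-1) k ≥ pvVal s1 s2 s3 i j (k-1)
            · rw [if_pos (show max (max (pvVal s1 s2 s3 (i-1) j k) (pvVal s1 s2 s3 i (j-1) k))
                  (pvVal s1 s2 s3 i j (k-1)) = pvVal s1 s2 s3 i (j-1) k by omega), if_pos c2,
                ih i (j-1) k _ _ _ (by omega) hi (by omega) hk]
              simp
            · rw [if_neg (show ¬(max (max (pvVal s1 s2 s3 (i-1) j k) (pvVal s1 s2 s3 i (j-1) k))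
                  (pvVal s1 s2 s3 i j (k-1)) = pvVal s1 s2 s3 i (j-1) k) by omega), if_neg c2,
                ih i j (k-1) _ _ _ (by omega) hi hj (by omega)]
              simp
      · rw [if_neg (fun h => hall ⟨h.1, h.2.1, h.2.2.1⟩), if_neg hall, if_neg hall]
        by_cases hi0 : i > 0
        · rw [if_pos hi0, if_pos hi0, ih (i-1) j k _ _ _ (by omega) (by omega) hj hk]
          simp
        · rw [if_neg hi0, if_neg hi0]
          by_cases hj0 : j > 0
          · rw [if_pos hj0, if_pos hj0, ih i (j-1) k _ _ _ (by omega) hi (by omega) hk]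
            simp
          · rw [if_neg hj0, if_neg hj0, ih i j (k-1) _ _ _ (by omega) hi hj (by omega)]
            simp

-- ===== VERDICT (by name: the statement is the Claim_ definition above) =====
theorem find_longest_common_subsequence_spec : Claim_equal_find_longest_common_subsequence := by
  intro str1 str2 str3 _
  unfold Spec_find_longest_common_subsequence
  unfold find_longest_common_subsequence find_longest_common_subsequence_alt
  have hdp : ∀ i j k, (pvAloopI str1.toList str2.toList str3.toList str2.toList.length
      str3.toList.length str1.toList.length (fun _ _ _ => 0, fun _ _ _ => '0')).1 i j k =
      pvVal str1.toList str2.toList str3.toList i j k := by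
    intro i j k
    rw [(pvAfill _ _ _ i j k).1]
    unfold pvVal
    exact if_congr (by unfold pvDone; omega) rfl rfl
  have hal : ∀ i j k, (pvAloopI str1.toList str2.toList str3.toList str2.toList.length
      str3.toList.length str1.toList.length (fun _ _ _ => 0, fun _ _ _ => '0')).2 i j k =
      if (1 ≤ i ∧ i ≤ str1.toList.length ∧ 1 ≤ j ∧ j ≤ str2.toList.length ∧
          1 ≤ k ∧ k ≤ str3.toList.length) ∧ pvMatch str1.toList str2.toList str3.toList i j k
      then '1' else '0' := by
    intro i j k
    rw [(pvAfill _ _ _ i j k).2]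
    exact if_congr (and_congr_left' (by unfold pvDone; omega)) rfl rfl
  have hB : ∀ i j k, (pvBloopI str1.toList str2.toList str3.toList str2.toList.length
      str3.toList.length str1.toList.length PySem.Dict.empty).getD (i, j, k) 0 =
      pvVal str1.toList str2.toList str3.toList i j k := by
    intro i j k
    rw [pvBfill _ _ _ i j k]
    unfold pvVal
    exact if_congr (by unfold pvDone; omega) rfl rfl
  have hb := pvBack_eq str1.toList str2.toList str3.toList _ _ _ hdp hal hB
    (str1.toList.length + str2.toList.length + str3.toList.length)
    str1.toList.length str2.toList.length str3.toList.length [] [] []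
    le_rfl le_rfl le_rfl le_rfl
  simp only [hb, List.append_nil, hdp, hB]
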